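-- pv_equiv track=rewrite | github.com/edisanch/extropic-thrml-exploration | 02_ebm_mnist_generation/ebm_model.py | create_4color_blocks
-- ===== SOURCE A (Python) =====
-- from typing import Tuple, List
--
-- def create_4color_blocks(height: int, width: int) -> List[List[int]]:
--     """
--     Create 4-coloring for 2D grid.
--
--     This provides more fine-grained blocking but doesn't improve parallelism
--     for 4-neighbor grids (useful for comparing strategies in Phase 6.3).
--
--     Pattern:
--         0 1 0 1 0 1 ...
--         2 3 2 3 2 3 ...
--         0 1 0 1 0 1 ...
--         2 3 2 3 2 3 ...
--
--     Args:
--         height: Grid height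
--         width: Grid width
--
--     Returns:
--         List of 4 blocks, where each block is a list of pixel indices
--     """
--     blocks = [[], [], [], []]  # 4 blocks
--
--     for i in range(height):
--         for j in range(width):
--             idx = i * width + j
--             # Color based on (row % 2, col % 2)
--             color = (i % 2) * 2 + (j % 2)
--             blocks[color].append(idx)
--
--     return blocks
-- ===== SOURCE B (Python) =====
-- def create_4color_blocks(height, width):
--     """Build each color block directly with strided ranges: block 2*r+c holds
--     the indices of rows with parity r and columns with parity c, in row-major
--     order, with no per-pixel modulo/dispatch."""
--     return [
--         [i * width + j for i in range(r, height, 2) for j in range(c, width, 2)]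
--         for r in (0, 1)
--         for c in (0, 1)
--     ]
-- ===== Notes on version B (the rewrite author's own statement) =====
-- stated objective: idiomatic
-- what changed: Instead of one row-major double loop computing color = (i%2)*2+(j%2) and dispatching each pixel into blocks[color], B builds each of the four blocks separately as a strided comprehension over the disjoint parity subgrid (rows r, r+2, ... and columns c, c+2, ...), with no modulo or dispatch.
import Mathlib
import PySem

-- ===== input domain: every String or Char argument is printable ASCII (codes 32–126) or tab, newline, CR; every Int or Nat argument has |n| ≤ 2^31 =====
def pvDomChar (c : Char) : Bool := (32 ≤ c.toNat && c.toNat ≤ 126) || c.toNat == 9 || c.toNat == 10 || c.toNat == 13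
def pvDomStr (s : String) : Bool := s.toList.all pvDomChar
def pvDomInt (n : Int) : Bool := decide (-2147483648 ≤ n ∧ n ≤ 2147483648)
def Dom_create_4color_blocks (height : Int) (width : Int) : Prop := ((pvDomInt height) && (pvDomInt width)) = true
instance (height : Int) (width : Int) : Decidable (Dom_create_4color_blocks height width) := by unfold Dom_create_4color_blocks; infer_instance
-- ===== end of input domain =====

-- B builds each of the four blocks separately with strided ranges over the parity
-- subgrids instead of A's row-major double loop with a per-pixel color dispatch (idiomatic).

-- ===== PORT A =====
-- A's loop body: compute idx and color, append idx to the chosen block of the 4-tuple state.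
def pvStepA (width : Int) (i : Int)
    (b : List Int × List Int × List Int × List Int) (j : Int) :
    List Int × List Int × List Int × List Int :=
  let idx := i * width + j
  let color := PySem.Int.mod i 2 * 2 + PySem.Int.mod j 2
  if color = 0 then (b.1 ++ [idx], b.2.1, b.2.2.1, b.2.2.2)
  else if color = 1 then (b.1, b.2.1 ++ [idx], b.2.2.1, b.2.2.2)
  else if color = 2 then (b.1, b.2.1, b.2.2.1 ++ [idx], b.2.2.2)
  else (b.1, b.2.1, b.2.2.1, b.2.2.2 ++ [idx])

-- A's inner loop: for j in range(width).
def pvRowA (width : Int) (b : List Int × List Int × List Int × List Int) (i : Int) :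
    List Int × List Int × List Int × List Int :=
  (PySem.List.pyRange 0 width 1).foldl (pvStepA width i) b

def create_4color_blocks (height : Int) (width : Int) : List (List Int) :=
  let blocks := (PySem.List.pyRange 0 height 1).foldl (pvRowA width) ([], [], [], [])
  [blocks.1, blocks.2.1, blocks.2.2.1, blocks.2.2.2]

-- ===== PORT B =====
def create_4color_blocks_alt (height : Int) (width : Int) : List (List Int) :=
  ([0, 1] : List Int).flatMap (fun r =>
    ([0, 1] : List Int).map (fun c =>
      (PySem.List.pyRange r height 2).flatMap (fun i =>
        (PySem.List.pyRange c width 2).map (fun j => i * width + j))))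

-- ===== PRECONDITION & SPEC =====
def Spec_create_4color_blocks (height : Int) (width : Int) (out : List (List Int)) : Prop := out = create_4color_blocks_alt height width
instance (height : Int) (width : Int) (out : List (List Int)) : Decidable (Spec_create_4color_blocks height width out) := by unfold Spec_create_4color_blocks; infer_instance

-- ===== CLAIM (what is proved, stated in full; the proofs are below) =====
def Claim_equal_create_4color_blocks : Prop := ∀ (height : Int) (width : Int), Dom_create_4color_blocks height width → Spec_create_4color_blocks height width (create_4color_blocks height width)

-- ===== LEMMAS AND PROOFS =====

-- parity filter of a range as a strided map
theorem pvFiltEven (n : Nat) :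
    (List.range n).filter (fun k => k % 2 == 0) = (List.range ((n + 1) / 2)).map (fun k => 2 * k) := by
  induction n with
  | zero => simp
  | succ n ih =>
    rcases Nat.even_or_odd n with h | h
    · obtain ⟨m, hm⟩ := h
      have h1 : (n + 1 + 1) / 2 = (n + 1) / 2 + 1 := by omega
      have h2 : 2 * ((n + 1) / 2) = n := by omega
      rw [List.range_succ, List.filter_append, ih, h1, List.range_succ, List.map_append]
      simp [h2]; omega
    · obtain ⟨m, hm⟩ := h
      have h1 : (n + 1 + 1) / 2 = (n + 1) / 2 := by omega
      rw [List.range_succ, List.filter_append, ih, h1]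
      simp; omega

theorem pvFiltOdd (n : Nat) :
    (List.range n).filter (fun k => k % 2 == 1) = (List.range (n / 2)).map (fun k => 2 * k + 1) := by
  induction n with
  | zero => simp
  | succ n ih =>
    rcases Nat.even_or_odd n with h | h
    · obtain ⟨m, hm⟩ := h
      have h1 : (n + 1) / 2 = n / 2 := by omega
      rw [List.range_succ, List.filter_append, ih, h1]
      simp; omega
    · obtain ⟨m, hm⟩ := h
      have h1 : (n + 1) / 2 = n / 2 + 1 := by omega
      have h2 : 2 * (n / 2) + 1 = n := by omega
      rw [List.range_succ, List.filter_append, ih, h1, List.range_succ, List.map_append]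
      simp [h2]; omega

-- step-2 pyRange from 0 or 1 = parity filter of the Nat range (holds for every Int bound)
theorem pvStride2Zero (b : Int) :
    PySem.List.pyRange 0 b 2 =
      ((List.range b.toNat).filter (fun k => k % 2 == 0)).map (fun (k : Nat) => (k : Int)) := by
  rw [PySem.List.pyRange_of_pos 0 b (by norm_num), pvFiltEven, List.map_map]
  by_cases hb : 0 < b
  · have h1 : ((b - 0 + 2 - 1) / 2).toNat = (b.toNat + 1) / 2 := by omega
    rw [if_pos hb, h1]
    apply List.map_congr_left; intro k _; simp
  · have h1 : b.toNat = 0 := by omega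
    rw [if_neg hb, h1]; simp

theorem pvStride2One (b : Int) :
    PySem.List.pyRange 1 b 2 =
      ((List.range b.toNat).filter (fun k => k % 2 == 1)).map (fun (k : Nat) => (k : Int)) := by
  rw [PySem.List.pyRange_of_pos 1 b (by norm_num), pvFiltOdd, List.map_map]
  by_cases hb : 1 < b
  · have h1 : ((b - 1 + 2 - 1) / 2).toNat = b.toNat / 2 := by omega
    rw [if_pos hb, h1]
    apply List.map_congr_left; intro k _; simp; ring
  · have h1 : b.toNat / 2 = 0 := by omega
    rw [if_neg hb, h1]; simp

-- the two half-rows of row i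
def pvE (i : Nat) (width : Int) (n : Nat) : List Int :=
  ((List.range n).filter (fun k => k % 2 == 0)).map (fun (j : Nat) => (i : Int) * width + (j : Int))
def pvO (i : Nat) (width : Int) (n : Nat) : List Int :=
  ((List.range n).filter (fun k => k % 2 == 1)).map (fun (j : Nat) => (i : Int) * width + (j : Int))

theorem pvModCast (n : Nat) : PySem.Int.mod (n : Int) 2 = ((n % 2 : Nat) : Int) := by
  simp [PySem.Int.mod, Int.fmod_eq_emod]

-- A's inner loop over the first n columns appends the even/odd half-rows to the
-- blocks selected by i's parity.
theorem pvRowAux (width : Int) (i : Nat) (b : List Int × List Int × List Int × List Int) (n : Nat) :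
    (List.range n).foldl (fun acc (j : Nat) => pvStepA width (i : Int) acc (j : Int)) b =
      if i % 2 = 0 then (b.1 ++ pvE i width n, b.2.1 ++ pvO i width n, b.2.2.1, b.2.2.2)
      else (b.1, b.2.1, b.2.2.1 ++ pvE i width n, b.2.2.2 ++ pvO i width n) := by
  induction n with
  | zero => simp [pvE, pvO]
  | succ n ih =>
    rw [List.range_succ, List.foldl_append, ih]
    have hE : pvE i width (n + 1) =
        pvE i width n ++ (if n % 2 = 0 then [(i : Int) * width + (n : Int)] else []) := by
      unfold pvE
      rw [List.range_succ, List.filter_append, List.map_append]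
      congr 1
      by_cases h : n % 2 = 0 <;> simp [h]
    have hO : pvO i width (n + 1) =
        pvO i width n ++ (if n % 2 = 1 then [(i : Int) * width + (n : Int)] else []) := by
      unfold pvO
      rw [List.range_succ, List.filter_append, List.map_append]
      congr 1
      by_cases h : n % 2 = 1 <;> simp [h]
    simp only [List.foldl_cons, List.foldl_nil]
    unfold pvStepA
    rw [pvModCast i, pvModCast n]
    rcases Nat.mod_two_eq_zero_or_one i with hi | hi <;>
      rcases Nat.mod_two_eq_zero_or_one n with hn | hn <;>
        simp [hi, hn, hE, hO]

-- the block of color 2*r+c after the first n rows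
def pvB (r c : Nat) (width : Int) (wn n : Nat) : List Int :=
  ((List.range n).filter (fun k => k % 2 == r)).flatMap (fun (i : Nat) =>
    ((List.range wn).filter (fun k => k % 2 == c)).map (fun (j : Nat) => (i : Int) * width + (j : Int)))

-- A's outer loop over the first n rows
theorem pvColAux (width : Int) (n : Nat) :
    (List.range n).foldl (fun b (i : Nat) => pvRowA width b (i : Int)) ([], [], [], []) =
      (pvB 0 0 width width.toNat n, pvB 0 1 width width.toNat n,
       pvB 1 0 width width.toNat n, pvB 1 1 width width.toNat n) := by
  induction n with
  | zero => simp [pvB]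
  | succ n ih =>
    rw [List.range_succ, List.foldl_append, ih]
    simp only [List.foldl_cons, List.foldl_nil]
    have hrow : pvRowA width
        (pvB 0 0 width width.toNat n, pvB 0 1 width width.toNat n,
         pvB 1 0 width width.toNat n, pvB 1 1 width width.toNat n) (n : Int) =
        if n % 2 = 0 then
          (pvB 0 0 width width.toNat n ++ pvE n width width.toNat,
           pvB 0 1 width width.toNat n ++ pvO n width width.toNat,
           pvB 1 0 width width.toNat n, pvB 1 1 width width.toNat n)
        else
          (pvB 0 0 width width.toNat n, pvB 0 1 width width.toNat n,
           pvB 1 0 width width.toNat n ++ pvE n width width.toNat,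
           pvB 1 1 width width.toNat n ++ pvO n width width.toNat) := by
      unfold pvRowA
      rw [PySem.List.pyRange_one]
      have : (width - 0).toNat = width.toNat := by omega
      rw [this, List.foldl_map]
      have := pvRowAux width n
          (pvB 0 0 width width.toNat n, pvB 0 1 width width.toNat n,
           pvB 1 0 width width.toNat n, pvB 1 1 width width.toNat n) width.toNat
      simp only [zero_add] at this ⊢
      rw [this]
    rw [hrow]
    have hB : ∀ r c : Nat, pvB r c width width.toNat (n + 1) =
        pvB r c width width.toNat n ++
          (if n % 2 = r then
            ((List.range width.toNat).filter (fun k => k % 2 == c)).map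
              (fun (j : Nat) => (n : Int) * width + (j : Int))
           else []) := by
      intro r c
      unfold pvB
      rw [List.range_succ, List.filter_append, List.flatMap_append]
      congr 1
      by_cases h : n % 2 = r <;> simp [h]
    rcases Nat.mod_two_eq_zero_or_one n with hn | hn <;>
      simp [hn, hB, pvE, pvO]

-- ===== VERDICT (by name: the statement is the Claim_ definition above) =====
theorem create_4color_blocks_spec : Claim_equal_create_4color_blocks := by
  intro height width _
  unfold Spec_create_4color_blocks create_4color_blocks create_4color_blocks_alt
  rw [PySem.List.pyRange_one 0 height]
  have h0 : (height - 0).toNat = height.toNat := by omega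
  rw [h0, List.foldl_map]
  simp only [zero_add, pvColAux width height.toNat]
  simp only [List.flatMap_cons, List.flatMap_nil, List.map_cons, List.map_nil,
    List.append_nil, List.cons_append, List.nil_append,
    pvStride2Zero, pvStride2One, List.flatMap_map, List.map_map]
  unfold pvB
  rfl
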